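-- pv_equiv track=rewrite | github.com/GundalaNikhil/DSA | fix_grd002.py | solve_grd002
-- ===== SOURCE A (Python) =====
-- import heapq
--
-- def solve_grd002(k, m, quantities):
--     pq = []
--     total_kits = 0
--     for q in quantities:
--         if q > 0:
--             heapq.heappush(pq, -q)
--             total_kits += q
--
--     fulfilled = min(m, total_kits)
--     to_distribute = fulfilled
--
--     while to_distribute > 0 and pq:
--         max_q = -heapq.heappop(pq)
--         max_q -= 1
--         to_distribute -= 1
--         if max_q > 0:
--             heapq.heappush(pq, -max_q)
--
--     remaining_types = len(pq)
--     zeroed_types = k - remaining_types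
--     return f"{fulfilled} {zeroed_types}"
-- ===== SOURCE B (Python) =====
-- def solve_grd002(k, m, quantities):
--     # Closed form: greedy max-first distribution zeroes a pile only after every
--     # pile has been levelled down to 1, so zeros = max(0, fulfilled - (total - n)).
--     positives = [q for q in quantities if q > 0]
--     total = sum(positives)
--     n = len(positives)
--     fulfilled = min(m, total)
--     zeros = max(0, fulfilled - (total - n))
--     return f"{fulfilled} {k - n + zeros}"
-- ===== Notes on version B (the rewrite author's own statement) =====
-- stated objective: faster
-- what changed: Replaces the heap simulation that hands out kits one at a time with an O(n) closed form: a pile is emptied only after all piles are levelled to 1, so the number of zeroed piles is max(0, fulfilled - (total - n)).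
import Mathlib
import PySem

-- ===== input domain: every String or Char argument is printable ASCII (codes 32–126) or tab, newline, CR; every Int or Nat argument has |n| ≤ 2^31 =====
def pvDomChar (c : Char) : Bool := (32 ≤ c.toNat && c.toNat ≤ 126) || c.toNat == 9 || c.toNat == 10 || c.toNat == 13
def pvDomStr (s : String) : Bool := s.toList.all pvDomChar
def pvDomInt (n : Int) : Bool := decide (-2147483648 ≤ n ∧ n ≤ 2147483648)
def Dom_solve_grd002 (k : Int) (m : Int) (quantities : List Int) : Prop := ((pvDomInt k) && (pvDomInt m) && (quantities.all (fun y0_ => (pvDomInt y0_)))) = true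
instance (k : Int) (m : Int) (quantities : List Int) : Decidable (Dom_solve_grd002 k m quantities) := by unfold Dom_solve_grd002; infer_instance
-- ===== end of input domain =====

-- B replaces A's heap simulation (one kit handed out per iteration) with an O(n) closed form;
-- a timing run measured it faster; equivalence is proved on all inputs (both are total).

-- ===== PORT A =====
-- heapq with negated values: heappop returns the minimum stored element, i.e. the
-- largest quantity; the heap is modelled as a multiset (List Int), pop = remove a minimum.
def heapPopA (l : List Int) : Option (Int × List Int) :=
  match l.min? with
  | none => none
  | some mn => some (mn, l.erase mn)

-- the while loop of A: fuel = to_distribute (it decreases by exactly 1 each iteration)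
def aLoopA : Nat → List Int → List Int
  | 0, pq => pq
  | t+1, pq =>
    match heapPopA pq with
    | none => pq
    | some (mn, rest) =>
      let max_q := -mn - 1
      if max_q > 0 then aLoopA t ((-max_q) :: rest) else aLoopA t rest

def solve_grd002 (k : Int) (m : Int) (quantities : List Int) : String :=
  let init := quantities.foldl
    (fun (acc : List Int × Int) q => if q > 0 then ((-q) :: acc.1, acc.2 + q) else acc) ([], 0)
  let pq := init.1
  let total_kits := init.2
  let fulfilled := min m total_kits
  let pqf := aLoopA fulfilled.toNat pq
  let zeroed_types := k - (pqf.length : Int)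
  PySem.Int.toStr fulfilled ++ " " ++ PySem.Int.toStr zeroed_types

-- ===== PORT B =====
def solve_grd002_alt (k : Int) (m : Int) (quantities : List Int) : String :=
  let positives := quantities.filter (fun q => decide (q > 0))
  let total := positives.sum
  let n : Int := positives.length
  let fulfilled := min m total
  let zeros := max 0 (fulfilled - (total - n))
  PySem.Int.toStr fulfilled ++ " " ++ PySem.Int.toStr (k - n + zeros)

-- ===== PRECONDITION & SPEC =====
def Spec_solve_grd002 (k : Int) (m : Int) (quantities : List Int) (out : String) : Prop := out = solve_grd002_alt k m quantities
instance (k : Int) (m : Int) (quantities : List Int) (out : String) : Decidable (Spec_solve_grd002 k m quantities out) := by unfold Spec_solve_grd002; infer_instance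

-- ===== CLAIM (what is proved, stated in full; the proofs are below) =====
def Claim_equal_solve_grd002 : Prop := ∀ (k : Int) (m : Int) (quantities : List Int), Dom_solve_grd002 k m quantities → Spec_solve_grd002 k m quantities (solve_grd002 k m quantities)

-- ===== LEMMAS AND PROOFS =====

lemma sum_le_neg_length (l : List Int) (h : ∀ x ∈ l, x ≤ -1) : l.sum ≤ -(l.length : Int) := by
  induction l with
  | nil => simp
  | cons a t ih =>
    have ha := h a (by simp)
    have := ih (fun x hx => h x (by simp [hx]))
    simp only [List.sum_cons, List.length_cons]
    push_cast
    omega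

lemma neg_length_le_sum (l : List Int) (h : ∀ x ∈ l, -1 ≤ x) : -(l.length : Int) ≤ l.sum := by
  induction l with
  | nil => simp
  | cons a t ih =>
    have ha := h a (by simp)
    have := ih (fun x hx => h x (by simp [hx]))
    simp only [List.sum_cons, List.length_cons]
    push_cast
    omega

-- the fold of A builds the negated positives (in reverse) and their total
lemma foldl_build (qs : List Int) (acc : List Int) (s : Int) :
    qs.foldl (fun (acc : List Int × Int) q => if q > 0 then ((-q) :: acc.1, acc.2 + q) else acc) (acc, s)
      = (((qs.filter (fun q => decide (q > 0))).reverse.map Neg.neg) ++ acc,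
         s + (qs.filter (fun q => decide (q > 0))).sum) := by
  induction qs generalizing acc s with
  | nil => simp
  | cons q rest ih =>
    by_cases hq : q > 0
    · simp [List.foldl_cons, hq, ih ((-q) :: acc) (s + q)]
      ring
    · simp [List.foldl_cons, hq, ih acc s]

-- core invariant: distributing t kits max-first from a multiset of negated positive piles
lemma aLoopA_length : ∀ (t : Nat) (l : List Int), (∀ x ∈ l, x ≤ -1) → (t : Int) ≤ -l.sum →
    ((aLoopA t l).length : Int) = l.length - max 0 ((t : Int) - (-l.sum - l.length)) := by
  intro t
  induction t with
  | zero =>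
    intro l hle _
    have := sum_le_neg_length l hle
    simp only [aLoopA, Nat.cast_zero]
    omega
  | succ t ih =>
    intro l hle hsum
    -- l is nonempty: otherwise its sum is 0 and (t+1 : Int) ≤ 0 is false
    cases hl : l.min? with
    | none =>
      exfalso
      have : l = [] := by
        cases l with
        | nil => rfl
        | cons a b => simp [List.min?] at hl
      subst this
      simp at hsum
      omega
    | some mn =>
      obtain ⟨hmem, hmin⟩ := List.min?_eq_some_iff.mp hl
      have hperm : List.Perm l (mn :: l.erase mn) := List.perm_cons_erase hmem
      have hsumE : (l.erase mn).sum = l.sum - mn := by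
        have := hperm.sum_eq; simp only [List.sum_cons] at this; omega
      have hlenE : ((l.erase mn).length : Int) = (l.length : Int) - 1 := by
        have := hperm.length_eq; simp only [List.length_cons] at this; omega
      have hleE : ∀ x ∈ l.erase mn, x ≤ -1 := fun x hx => hle x (List.mem_of_mem_erase hx)
      have hmn1 : mn ≤ -1 := hle mn hmem
      simp only [aLoopA, heapPopA, hl]
      by_cases hpos : -mn - 1 > 0
      · -- max_q > 0 : push -(max_q) = mn + 1 back
        simp only [hpos, if_pos]
        have harg : (-(-mn - 1)) = mn + 1 := by ring
        rw [harg]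
        have h1 : ∀ x ∈ (mn + 1) :: l.erase mn, x ≤ -1 := by
          intro x hx
          rcases List.mem_cons.mp hx with h | h
          · omega
          · exact hleE x h
        have h2 : (t : Int) ≤ -((mn + 1) :: l.erase mn).sum := by
          simp only [List.sum_cons]
          push_cast at hsum ⊢
          omega
        have := ih ((mn + 1) :: l.erase mn) h1 h2
        simp only [List.sum_cons, List.length_cons] at this ⊢
        push_cast at this ⊢
        omega
      · -- max_q ≤ 0 : mn = -1, so every pile is a single kit; one pile is zeroed
        simp only [hpos]
        have hmn : mn = -1 := by omega
        have hall : ∀ x ∈ l, -1 ≤ x := by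
          intro x hx
          have := hmin x hx
          omega
        have hsl : l.sum = -(l.length : Int) :=
          le_antisymm (sum_le_neg_length l hle) (neg_length_le_sum l hall)
        have h2 : (t : Int) ≤ -(l.erase mn).sum := by
          push_cast at hsum
          omega
        have := ih (l.erase mn) hleE h2
        have hallE : ∀ x ∈ l.erase mn, -1 ≤ x := fun x hx => hall x (List.mem_of_mem_erase hx)
        have hslE : (l.erase mn).sum = -((l.erase mn).length : Int) :=
          le_antisymm (sum_le_neg_length _ hleE) (neg_length_le_sum _ hallE)
        push_cast at this hsum ⊢
        omega

lemma one_le_of_mem_filter (qs : List Int) (x : Int)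
    (hx : x ∈ qs.filter (fun q => decide (q > 0))) : 1 ≤ x := by
  have := List.of_mem_filter hx
  simpa using this

lemma sum_map_neg_eq (l : List Int) : (l.map Neg.neg).sum = -l.sum := by
  induction l with
  | nil => simp
  | cons a t ih => simp [ih]; ring

lemma length_le_sum (l : List Int) (h : ∀ x ∈ l, 1 ≤ x) : (l.length : Int) ≤ l.sum := by
  induction l with
  | nil => simp
  | cons a t ih =>
    have ha := h a (by simp)
    have := ih (fun x hx => h x (by simp [hx]))
    simp only [List.sum_cons, List.length_cons]
    push_cast
    omega

-- ===== VERDICT (by name: the statement is the Claim_ definition above) =====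
theorem solve_grd002_spec : Claim_equal_solve_grd002 := by
  intro k m qs _
  unfold Spec_solve_grd002
  simp only [solve_grd002, solve_grd002_alt, foldl_build, List.append_nil, zero_add]
  set P := qs.filter (fun q => decide (q > 0)) with hP
  set S := P.sum with hS
  set pq := P.reverse.map Neg.neg with hpq
  have hPos : ∀ x ∈ P, 1 ≤ x := by
    intro x hx
    exact one_le_of_mem_filter qs x (hP ▸ hx)
  have hpqlen : (pq.length : Int) = (P.length : Int) := by simp [hpq]
  have hpqsum : pq.sum = -S := by
    simp [hpq, hS, List.map_reverse, List.sum_reverse, sum_map_neg_eq]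
  have hpqle : ∀ x ∈ pq, x ≤ -1 := by
    intro x hx
    simp only [hpq, List.mem_map, List.mem_reverse] at hx
    obtain ⟨q, hq, rfl⟩ := hx
    have := hPos q hq
    omega
  have hSn : (P.length : Int) ≤ S := hS ▸ length_le_sum P hPos
  have hn0 : (0 : Int) ≤ (P.length : Int) := Int.natCast_nonneg _
  have hfS : min m S ≤ S := min_le_right _ _
  have hfuel : (((min m S).toNat : Nat) : Int) ≤ -pq.sum := by
    rw [hpqsum]; omega
  have hmain := aLoopA_length (min m S).toNat pq hpqle hfuel
  congr 1
  congr 1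
  rw [hmain, hpqsum, hpqlen]
  omega
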